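-- pv_equiv track=rewrite | github.com/bd4sur/bd4sur.github.io | script/q_problem.py | q_function
-- ===== SOURCE A (Python) =====
-- NUM_DIGITS = 5
--
-- def q_function(number: int) -> int:
--     """
--     Q函数：一串数字中有多少个圈儿。
--         例如：q(2024)=1，q(888)=6
--         出典：https://www.zhihu.com/question/338618946/answer/831919337、https://www.zhihu.com/question/341026031/answer/841578656
--     """
--     #         0  1  2  3  4  5  6  7  8  9  10
--     qv_map = [1, 0, 0, 0, 0, 0, 1, 0, 2, 1, 0]
--     istr = f"---------------------------{str(number)}"[-NUM_DIGITS:]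
--     qv = 0
--     for i in range(NUM_DIGITS):
--         d = 10 if istr[i] == "-" else int(istr[i])
--         qv = qv + qv_map[d]
--     return qv
-- ===== SOURCE B (Python) =====
-- def q_function(number: int) -> int:
--     # Pure arithmetic: no string conversion, no lookup table.  Count the digits
--     # of |number| by repeated division, then add each of the last min(digits, 5)
--     # digits' hole count (8 has two holes; 0, 6, 9 have one).  A's 27-dash
--     # padding and [-5:] slice only ever contribute dash characters (0 holes), so
--     # this equals A's value for every int.
--     n = abs(number)
--     digits = 1
--     t = n
--     while t >= 10:
--         t //= 10
--         digits += 1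
--     total = 0
--     for _ in range(min(digits, 5)):
--         r = n % 10
--         total += 2 if r == 8 else (1 if r in (0, 6, 9) else 0)
--         n //= 10
--     return total
-- ===== Notes on version B (the rewrite author's own statement) =====
-- stated objective: alternative
-- what changed: B never builds a string: it works arithmetically on abs(number), counting digits by repeated floor division and summing per-digit hole counts of the last min(digits,5) digits via n % 10 / n //= 10, instead of A's dash-padded string slice with a per-character lookup table.
import Mathlib
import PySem

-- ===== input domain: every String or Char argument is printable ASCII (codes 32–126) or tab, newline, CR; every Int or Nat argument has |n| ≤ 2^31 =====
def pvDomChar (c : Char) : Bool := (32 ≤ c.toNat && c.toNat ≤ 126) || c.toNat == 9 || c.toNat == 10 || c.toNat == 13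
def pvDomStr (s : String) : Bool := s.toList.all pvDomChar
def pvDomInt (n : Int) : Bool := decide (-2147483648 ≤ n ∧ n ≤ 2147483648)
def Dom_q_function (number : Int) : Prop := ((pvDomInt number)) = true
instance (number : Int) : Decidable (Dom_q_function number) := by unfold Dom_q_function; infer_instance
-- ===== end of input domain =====

-- B replaces A's dash-padded string slice and per-character lookup loop with pure
-- integer arithmetic on abs(number) (digit count by repeated division, per-digit
-- hole sum via % 10 and // 10); same return value everywhere, no speed claim.

-- ===== PORT A =====
-- NUM_DIGITS = 5
def pvNUM_DIGITS : Int := 5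

-- literal port of A: pad str(number) with 27 dashes on the left, keep the last 5
-- characters, loop i over range(5) adding qv_map[d].  Strings are handled on the
-- List Char side.  Both pyGetD defaults are never used where Python would raise:
-- istr always has length 5 and 0 ≤ d ≤ 10 < len(qv_map).
def q_function (number : Int) : Int :=
  let qv_map : List Int := [1, 0, 0, 0, 0, 0, 1, 0, 2, 1, 0]
  let istr : List Char :=
    PySem.List.slice (List.replicate 27 '-' ++ PySem.Int.toChars number) (some (-5)) none
  (PySem.List.pyRange 0 pvNUM_DIGITS).foldl
    (fun qv i =>
      qv + PySem.List.pyGetD qv_map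
        (if PySem.List.pyGetD istr i ' ' == '-' then 10
         else (PySem.Int.ofChars? [PySem.List.pyGetD istr i ' ']).getD 0) 0)
    0

-- ===== PORT B =====
-- literal port of Source B.  abs(number) is a nonnegative int, so its arithmetic
-- (%, //, >= on nonnegative values with positive divisor 10) is exactly Nat
-- arithmetic; the state is carried as Nat.

-- the 'digits = 1; while t >= 10: t //= 10; digits += 1' loop of Source B
def pvDigitCount (t : Nat) : Nat :=
  if 10 ≤ t then pvDigitCount (t / 10) + 1 else 1
decreasing_by exact Nat.div_lt_self (by omega) (by omega)

-- the 'for _ in range(m)' loop of Source B over state (total, n)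
def pvLoopB : Nat → Int → Nat → Int
  | 0, total, _ => total
  | m + 1, total, n =>
      pvLoopB m
        (total + (if n % 10 = 8 then 2 else if n % 10 = 0 ∨ n % 10 = 6 ∨ n % 10 = 9 then 1 else 0))
        (n / 10)

def q_function_alt (number : Int) : Int :=
  let n : Nat := number.natAbs          -- n = abs(number)
  let digits : Nat := pvDigitCount n
  pvLoopB (min digits 5) 0 n

-- ===== PRECONDITION & SPEC =====
def Spec_q_function (number : Int) (out : Int) : Prop := out = q_function_alt number
instance (number : Int) (out : Int) : Decidable (Spec_q_function number out) := by unfold Spec_q_function; infer_instance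

-- ===== CLAIM (what is proved, stated in full; the proofs are below) =====
def Claim_equal_q_function : Prop := ∀ (number : Int), Dom_q_function number → Spec_q_function number (q_function number)

-- ===== LEMMAS AND PROOFS =====

-- A's per-character weight, extracted from the loop body
def pvW (c : Char) : Int :=
  PySem.List.pyGetD [1, 0, 0, 0, 0, 0, 1, 0, 2, 1, 0]
    (if c == '-' then 10 else (PySem.Int.ofChars? [c]).getD 0) 0

-- Source B's per-digit hole count, extracted from its loop body
def pvHole (r : Nat) : Int :=
  if r = 8 then 2 else if r = 0 ∨ r = 6 ∨ r = 9 then 1 else 0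

lemma pvW_digitChar (r : Nat) (h : r < 10) : pvW (Nat.digitChar r) = pvHole r := by
  interval_cases r <;> decide

-- A's fixed 5-iteration indexing loop is the weight sum over the 5 characters
lemma pvLoop (l : List Char) (hlen : l.length = 5) :
    (PySem.List.pyRange 0 5).foldl (fun qv i => qv + pvW (PySem.List.pyGetD l i ' ')) 0
      = (l.map pvW).sum := by
  match l, hlen with
  | [a, b, c, d, e], _ =>
    rw [show PySem.List.pyRange 0 5 = [0, 1, 2, 3, 4] from by decide]
    simp only [List.foldl, List.map, List.sum_cons, List.sum_nil]
    simp [PySem.List.pyGetD, PySem.List.pyGet?, PySem.List.pyIdx?]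
    ring

-- Nat.toDigitsCore: the accumulator can be pulled out
lemma pvCore_acc (f : Nat) : ∀ (n : Nat) (acc : List Char),
    Nat.toDigitsCore 10 f n acc = Nat.toDigitsCore 10 f n [] ++ acc := by
  induction f with
  | zero => intro n acc; simp [Nat.toDigitsCore]
  | succ f ih =>
    intro n acc
    simp only [Nat.toDigitsCore]
    split
    · simp
    · rw [ih (n / 10) (Nat.digitChar (n % 10) :: acc), ih (n / 10) [Nat.digitChar (n % 10)]]
      simp

-- Nat.toDigitsCore: any sufficient fuel gives the same result
lemma pvCore_fuel : ∀ (n f₁ f₂ : Nat) (acc : List Char), n < f₁ → n < f₂ →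
    Nat.toDigitsCore 10 f₁ n acc = Nat.toDigitsCore 10 f₂ n acc := by
  intro n
  induction n using Nat.strong_induction_on with
  | _ n ih =>
    intro f₁ f₂ acc h₁ h₂
    match f₁, f₂, h₁, h₂ with
    | g₁ + 1, g₂ + 1, _, _ =>
      simp only [Nat.toDigitsCore]
      split
      · rfl
      · rename_i hne
        have hlt : n / 10 < n := Nat.div_lt_self (by omega) (by omega)
        exact ih (n / 10) hlt g₁ g₂ _ (by omega) (by omega)

lemma pvToDigits_lt (n : Nat) (h : n < 10) : Nat.toDigits 10 n = [Nat.digitChar n] := by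
  have h0 : n / 10 = 0 := Nat.div_eq_of_lt h
  simp [Nat.toDigits, Nat.toDigitsCore, h0, Nat.mod_eq_of_lt h]

lemma pvToDigits_ge (n : Nat) (h : 10 ≤ n) :
    Nat.toDigits 10 n = Nat.toDigits 10 (n / 10) ++ [Nat.digitChar (n % 10)] := by
  have h0 : ¬ n / 10 = 0 := by omega
  have hlt : n / 10 < n := Nat.div_lt_self (by omega) (by omega)
  calc Nat.toDigits 10 n
      = Nat.toDigitsCore 10 (n + 1) n [] := rfl
    _ = Nat.toDigitsCore 10 n (n / 10) [Nat.digitChar (n % 10)] := by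
        simp [Nat.toDigitsCore, h0]
    _ = Nat.toDigitsCore 10 n (n / 10) [] ++ [Nat.digitChar (n % 10)] := pvCore_acc _ _ _
    _ = Nat.toDigitsCore 10 (n / 10 + 1) (n / 10) [] ++ [Nat.digitChar (n % 10)] := by
        rw [pvCore_fuel (n / 10) n (n / 10 + 1) [] (by omega) (by omega)]
    _ = Nat.toDigits 10 (n / 10) ++ [Nat.digitChar (n % 10)] := rfl

lemma pvLoopB_acc : ∀ (m : Nat) (t : Int) (n : Nat), pvLoopB m t n = t + pvLoopB m 0 n := by
  intro m
  induction m with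
  | zero => intro t n; simp [pvLoopB]
  | succ m ih =>
    intro t n
    simp only [pvLoopB]
    rw [ih (t + _) (n / 10), ih (0 + _) (n / 10)]
    ring

-- the sum of A's weights over the last j characters of str(n) (n : Nat) is Source B's loop
lemma pvMainNat : ∀ (n j : Nat),
    (((Nat.toDigits 10 n).drop ((Nat.toDigits 10 n).length - j)).map pvW).sum
      = pvLoopB (min (pvDigitCount n) j) 0 n := by
  intro n
  induction n using Nat.strong_induction_on with
  | _ n ih =>
    intro j
    by_cases h : 10 ≤ n
    · have hlt : n / 10 < n := Nat.div_lt_self (by omega) (by omega)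
      rw [pvToDigits_ge n h, pvDigitCount]
      simp only [h, if_pos]
      match j with
      | 0 => simp [pvLoopB]
      | j + 1 =>
        have hd : ((Nat.toDigits 10 (n / 10) ++ [Nat.digitChar (n % 10)]).drop
            ((Nat.toDigits 10 (n / 10) ++ [Nat.digitChar (n % 10)]).length - (j + 1)))
            = (Nat.toDigits 10 (n / 10)).drop ((Nat.toDigits 10 (n / 10)).length - j)
              ++ [Nat.digitChar (n % 10)] := by
          rw [List.drop_append]
          have hlen : (Nat.toDigits 10 (n / 10) ++ [Nat.digitChar (n % 10)]).length
              = (Nat.toDigits 10 (n / 10)).length + 1 := by simp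
          rw [hlen]
          congr 1
          · congr 1; omega
          · have h0 : (Nat.toDigits 10 (n / 10)).length + 1 - (j + 1)
                - (Nat.toDigits 10 (n / 10)).length = 0 := by omega
            rw [h0, List.drop_zero]
        rw [hd]
        have hmin : min (pvDigitCount (n / 10) + 1) (j + 1) = min (pvDigitCount (n / 10)) j + 1 := by
          omega
        rw [hmin]
        simp only [List.map_append, List.sum_append, List.map_cons, List.map_nil,
          List.sum_cons, List.sum_nil, pvLoopB]
        rw [ih (n / 10) hlt j, pvLoopB_acc _ (0 + _) (n / 10),
          pvW_digitChar (n % 10) (Nat.mod_lt _ (by omega))]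
        unfold pvHole
        ring
    · rw [pvToDigits_lt n (by omega), pvDigitCount]
      simp only [h, if_false]
      match j with
      | 0 => simp [pvLoopB]
      | j + 1 =>
        have hmin : min 1 (j + 1) = 1 := by omega
        rw [hmin]
        simp only [pvLoopB, List.length_cons, List.length_nil]
        have hdrop : (0 + 1) - (j + 1) = 0 := by omega
        rw [hdrop, List.drop_zero]
        have hmod : n % 10 = n := Nat.mod_eq_of_lt (by omega)
        simp [pvW_digitChar n (by omega), hmod, pvHole]

lemma pvW_dash : pvW '-' = 0 := by decide

-- padding dashes contribute nothing to the weight sum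
lemma pvSum_pad (d : Nat) (l : List Char) :
    ((List.replicate d '-' ++ l).map pvW).sum = (l.map pvW).sum := by
  simp [List.map_append, List.sum_append, List.map_replicate, List.sum_replicate, pvW_dash]

-- the two programs agree everywhere
lemma pvMain (n : Int) : q_function n = q_function_alt n := by
  have hA : q_function n =
      (PySem.List.pyRange 0 5).foldl
        (fun qv i => qv + pvW (PySem.List.pyGetD
          (PySem.List.slice (List.replicate 27 '-' ++ PySem.Int.toChars n) (some (-5)) none) i ' ')) 0 := rfl
  rw [hA,
    PySem.List.slice_from_neg_ofNat (List.replicate 27 '-' ++ PySem.Int.toChars n) 5 (by omega)]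
  set cs := PySem.Int.toChars n with hcs
  set k := cs.length with hk
  have hdecomp : List.drop ((List.replicate 27 '-' ++ cs).length - 5) (List.replicate 27 '-' ++ cs)
      = List.replicate (27 - (22 + k)) '-' ++ List.drop (k - 5) cs := by
    rw [List.drop_append, List.drop_replicate]
    congr 2; simp [← hk]; omega
  rw [hdecomp]
  have hlen : (List.replicate (27 - (22 + k)) '-' ++ List.drop (k - 5) cs).length = 5 := by
    simp only [List.length_append, List.length_replicate, List.length_drop, ← hk]
    omega
  rw [pvLoop _ hlen, pvSum_pad]
  show ((cs.drop (k - 5)).map pvW).sum = q_function_alt n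
  by_cases hneg : n < 0
  · have hcs' : cs = '-' :: Nat.toDigits 10 n.natAbs := by
      rw [hcs]; simp [PySem.Int.toChars, hneg]
    set l := Nat.toDigits 10 n.natAbs with hl
    have hdash : ((cs.drop (k - 5)).map pvW).sum = ((l.drop (l.length - 5)).map pvW).sum := by
      rw [hcs', hk, hcs']
      by_cases h5 : 5 ≤ l.length
      · have : ('-' :: l).length - 5 = (l.length - 5) + 1 := by simp; omega
        rw [this, List.drop_succ_cons]
      · have h0 : ('-' :: l).length - 5 = 0 := by simp; omega
        have h0' : l.length - 5 = 0 := by omega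
        rw [h0, h0', List.drop_zero, List.drop_zero]
        simp [pvW_dash]
    rw [hdash, pvMainNat n.natAbs 5]
    rfl
  · have hcs' : cs = Nat.toDigits 10 n.toNat := by
      rw [hcs]; simp [PySem.Int.toChars, hneg]
    have habs : n.toNat = n.natAbs := by omega
    rw [hk, hcs', habs, pvMainNat n.natAbs 5]
    rfl

-- ===== VERDICT (by name: the statement is the Claim_ definition above) =====
theorem q_function_spec : Claim_equal_q_function := by
  intro n _
  unfold Spec_q_function
  exact pvMain n
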